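-- pv_equiv track=rewrite | github.com/Ziyang-Huang/.Net-Project-Modification-History | project-modification-history-statistics.py | compute_accumulators
-- ===== SOURCE A (Python) =====
-- from typing import List, Tuple, Dict, Optional
--
-- ACC_MAX_YEARS = 5
--
-- def compute_accumulators(year_counts: Dict[str, int], years: List[str], max_k: int = ACC_MAX_YEARS) -> Dict[str, int]:
--     """Compute cumulative sums for the most recent 1..max_k years based on the provided years order."""
--     vals = [year_counts[y] for y in years]
--     acc: Dict[str, int] = {}
--     running = 0
--     for k in range(1, max_k + 1):
--         if k <= len(vals):
--             running += vals[k - 1]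
--         acc[f"Acc_{k}"] = running
--     return acc
-- ===== SOURCE B (Python) =====
-- ACC_MAX_YEARS = 5
--
-- def compute_accumulators(year_counts, years, max_k=ACC_MAX_YEARS):
--     """Build the prefix-sum table once, then emit Acc_1..Acc_max_k by clamped indexing."""
--     prefixes = []
--     total = 0
--     for y in years:
--         total += year_counts[y]
--         prefixes.append(total)
--     return {
--         f"Acc_{k}": (prefixes[min(k, len(prefixes)) - 1] if prefixes else 0)
--         for k in range(1, max_k + 1)
--     }
-- ===== Notes on version B (the rewrite author's own statement) =====
-- stated objective: alternative
-- what changed: B first materialises the full prefix-sum table over years in one pass and then emits Acc_1..Acc_max_k by clamped indexing into that table, instead of threading a running sum through the emission loop; Pre_ excludes inputs where some year in years is missing from year_counts, on which A raises KeyError.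
import Mathlib
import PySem

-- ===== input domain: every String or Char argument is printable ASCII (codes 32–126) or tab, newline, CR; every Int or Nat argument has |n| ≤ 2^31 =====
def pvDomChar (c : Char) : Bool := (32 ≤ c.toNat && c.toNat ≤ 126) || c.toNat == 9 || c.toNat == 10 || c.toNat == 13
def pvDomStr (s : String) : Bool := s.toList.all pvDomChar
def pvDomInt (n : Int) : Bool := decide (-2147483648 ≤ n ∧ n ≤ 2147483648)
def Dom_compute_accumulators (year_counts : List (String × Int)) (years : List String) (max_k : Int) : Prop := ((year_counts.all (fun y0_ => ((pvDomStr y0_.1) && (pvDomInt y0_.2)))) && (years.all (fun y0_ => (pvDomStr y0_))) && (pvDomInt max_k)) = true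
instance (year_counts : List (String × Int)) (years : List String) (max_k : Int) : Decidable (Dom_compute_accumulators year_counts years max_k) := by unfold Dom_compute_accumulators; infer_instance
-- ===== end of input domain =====

-- B replaces A's running sum threaded through the emission loop by a prefix-sum table
-- built in one pass, then emits Acc_1..Acc_max_k by clamped indexing (objective: alternative).

-- ===== PORT A =====
def compute_accumulators (year_counts : List (String × Int)) (years : List String) (max_k : Int) : List (String × Int) :=
  -- vals = [year_counts[y] for y in years]  (total via getD; Pre_ guarantees every key is present)
  let vals : List Int := years.map (fun y => PySem.Dict.getD (PySem.Dict.mk year_counts) y 0)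
  -- acc = {}; running = 0; for k in range(1, max_k+1): …
  (((PySem.List.pyRange 1 (max_k + 1) 1).foldl
      (fun (st : PySem.Dict String Int × Int) k =>
        let running := if k ≤ (vals.length : Int) then st.2 + PySem.List.pyGetD vals (k - 1) 0 else st.2
        (st.1.insert ("Acc_" ++ PySem.Int.toStr k) running, running))
      (PySem.Dict.empty, 0)).1).items

-- ===== PORT B =====
def compute_accumulators_alt (year_counts : List (String × Int)) (years : List String) (max_k : Int) : List (String × Int) :=
  -- prefixes = []; total = 0; for y in years: total += year_counts[y]; prefixes.append(total)
  let prefixes : List Int :=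
    (years.foldl
      (fun (st : List Int × Int) y =>
        let total := st.2 + PySem.Dict.getD (PySem.Dict.mk year_counts) y 0
        (st.1 ++ [total], total))
      ([], 0)).1
  -- {f"Acc_{k}": (prefixes[min(k, len(prefixes)) - 1] if prefixes else 0) for k in range(1, max_k+1)}
  ((PySem.List.pyRange 1 (max_k + 1) 1).foldl
      (fun (d : PySem.Dict String Int) k =>
        d.insert ("Acc_" ++ PySem.Int.toStr k)
          (if prefixes.isEmpty then 0
           else PySem.List.pyGetD prefixes (min k (prefixes.length : Int) - 1) 0))
      PySem.Dict.empty).items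

-- ===== PRECONDITION & SPEC =====
-- Pre_ excludes exactly the inputs where some year of `years` is not a key of `year_counts`:
-- there A raises KeyError.
def Pre_compute_accumulators (year_counts : List (String × Int)) (years : List String) (max_k : Int) : Prop :=
  ∀ y ∈ years, y ∈ year_counts.map Prod.fst
instance (year_counts : List (String × Int)) (years : List String) (max_k : Int) : Decidable (Pre_compute_accumulators year_counts years max_k) := by unfold Pre_compute_accumulators; infer_instance

def pvWitness_compute_accumulators : (List (String × Int)) × List String × Int :=
  ([("2020", 3), ("2021", 4)], ["2021", "2020"], 3)

def Spec_compute_accumulators (year_counts : List (String × Int)) (years : List String) (max_k : Int) (out : List (String × Int)) : Prop := out = compute_accumulators_alt year_counts years max_k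
instance (year_counts : List (String × Int)) (years : List String) (max_k : Int) (out : List (String × Int)) : Decidable (Spec_compute_accumulators year_counts years max_k out) := by unfold Spec_compute_accumulators; infer_instance

-- ===== CLAIM (what is proved, stated in full; the proofs are below) =====
def Claim_equal_compute_accumulators : Prop := ∀ (year_counts : List (String × Int)) (years : List String) (max_k : Int), Dom_compute_accumulators year_counts years max_k → Pre_compute_accumulators year_counts years max_k → Spec_compute_accumulators year_counts years max_k (compute_accumulators year_counts years max_k)

-- ===== LEMMAS AND PROOFS =====

-- B's prefix loop produces the closed-form prefix-sum table.
lemma pv_scan_spec (xs : List Int) : ∀ (acc : List Int) (t : Int),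
    (xs.foldl (fun (st : List Int × Int) x => (st.1 ++ [st.2 + x], st.2 + x)) (acc, t)).1
      = acc ++ (List.range xs.length).map (fun i => t + (xs.take (i + 1)).sum) := by
  induction xs with
  | nil => intro acc t; simp
  | cons x xs ih =>
    intro acc t
    simp only [List.foldl_cons, ih, List.length_cons, List.range_succ_eq_map,
      List.map_cons, List.map_map]
    simp [Function.comp, List.append_assoc, add_assoc]

-- A's running-sum update equals the next clamped prefix sum.
lemma pv_run_eq (vals : List Int) (k : Int) (hk : 1 ≤ k) :
    (if k ≤ (vals.length : Int) then (vals.take (k - 1).toNat).sum + PySem.List.pyGetD vals (k - 1) 0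
     else (vals.take (k - 1).toNat).sum) = (vals.take k.toNat).sum := by
  split_ifs with h
  · have h1 : (k - 1).toNat < vals.length := by omega
    rw [PySem.List.pyGetD_eq_getElem vals 0 (by omega) (by exact_mod_cast (by omega : k - 1 < (vals.length : Int)))]
    have hk1 : k.toNat = (k - 1).toNat + 1 := by omega
    rw [hk1, List.take_succ, List.sum_append, List.getElem?_eq_getElem h1]
    simp
  · have h1 : vals.length ≤ (k - 1).toNat := by omega
    rw [List.take_of_length_le h1, List.take_of_length_le (by omega)]

-- B's clamped table lookup equals the same clamped prefix sum.
lemma pv_val_eq (vals : List Int) (k : Int) (hk : 1 ≤ k) :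
    (let prefixes := (List.range vals.length).map (fun i => (vals.take (i + 1)).sum)
     if prefixes.isEmpty then 0
     else PySem.List.pyGetD prefixes (min k (prefixes.length : Int) - 1) 0)
      = (vals.take k.toNat).sum := by
  simp only [List.isEmpty_iff, List.length_map, List.length_range]
  split_ifs with h
  · have : vals.length = 0 := by
      rcases vals with _ | _ <;> simp_all
    simp [List.eq_nil_of_length_eq_zero this]
  · have hlen : 0 < vals.length := by
      rcases vals with _ | _ <;> simp_all
    set L := vals.length with hL
    have hidx0 : (0 : Int) ≤ min k (L : Int) - 1 := by omega
    have hidx1 : min k (L : Int) - 1 < (((List.range L).map (fun i => (vals.take (i + 1)).sum)).length : Int) := by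
      simp only [List.length_map, List.length_range]; omega
    rw [PySem.List.pyGetD_eq_getElem _ _ hidx0 hidx1]
    have hlt : (min k (L : Int) - 1).toNat < L := by omega
    rw [List.getElem_map, List.getElem_range]
    congr 1
    have : (min k (L : Int) - 1).toNat + 1 = min k.toNat L := by omega
    rw [this]
    by_cases h' : k.toNat ≤ L
    · rw [min_eq_left h']
    · rw [min_eq_right (by omega), List.take_of_length_le le_rfl, List.take_of_length_le (by omega)]

-- The emission loops agree: A threading running = prefix sum so far, B reading the table.
lemma pv_loop_eq (vals : List Int) (n : Nat) : ∀ (a : Int), 1 ≤ a → ∀ (d : PySem.Dict String Int),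
    ((PySem.List.pyRange a (a + n) 1).foldl
        (fun (st : PySem.Dict String Int × Int) k =>
          let running := if k ≤ (vals.length : Int) then st.2 + PySem.List.pyGetD vals (k - 1) 0 else st.2
          (st.1.insert ("Acc_" ++ PySem.Int.toStr k) running, running))
        (d, (vals.take (a - 1).toNat).sum)).1
      = (PySem.List.pyRange a (a + n) 1).foldl
          (fun (d : PySem.Dict String Int) k =>
            d.insert ("Acc_" ++ PySem.Int.toStr k)
              (let prefixes := (List.range vals.length).map (fun i => (vals.take (i + 1)).sum)
               if prefixes.isEmpty then 0
               else PySem.List.pyGetD prefixes (min k (prefixes.length : Int) - 1) 0))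
          d := by
  induction n with
  | zero =>
    intro a ha d
    rw [PySem.List.pyRange_one_eq_nil (by omega)]
    simp
  | succ m ih =>
    intro a ha d
    rw [PySem.List.pyRange_one_cons (by omega)]
    simp only [List.foldl_cons]
    have hrun : (if a ≤ (vals.length : Int) then (vals.take (a - 1).toNat).sum + PySem.List.pyGetD vals (a - 1) 0
        else (vals.take (a - 1).toNat).sum) = (vals.take a.toNat).sum := pv_run_eq vals a ha
    have hval := pv_val_eq vals a ha
    simp only [] at hval ⊢
    rw [hrun, hval]
    have harith : a + 1 + (m : Int) = a + ((m + 1 : Nat) : Int) := by push_cast; omega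
    have ha1 : ((a + 1) - 1).toNat = a.toNat := by omega
    have := ih (a + 1) (by omega) (d.insert ("Acc_" ++ PySem.Int.toStr a) (vals.take a.toNat).sum)
    rw [ha1, harith] at this
    exact this

-- ===== VERDICT (by name: the statement is the Claim_ definition above) =====
theorem compute_accumulators_spec : Claim_equal_compute_accumulators := by
  intro year_counts years max_k _ _
  unfold Spec_compute_accumulators compute_accumulators compute_accumulators_alt
  set vals : List Int := years.map (fun y => PySem.Dict.getD (PySem.Dict.mk year_counts) y 0) with hvals
  have hpref : (years.foldl
      (fun (st : List Int × Int) y =>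
        (st.1 ++ [st.2 + PySem.Dict.getD (PySem.Dict.mk year_counts) y 0],
         st.2 + PySem.Dict.getD (PySem.Dict.mk year_counts) y 0))
      ([], 0)).1
      = (List.range vals.length).map (fun i => (vals.take (i + 1)).sum) := by
    rw [hvals, ← List.foldl_map (f := fun y => PySem.Dict.getD (PySem.Dict.mk year_counts) y 0)
      (g := fun (st : List Int × Int) x => (st.1 ++ [st.2 + x], st.2 + x))]
    rw [pv_scan_spec]
    simp
  simp only [hpref]
  by_cases hm : max_k + 1 ≤ 1
  · rw [PySem.List.pyRange_one_eq_nil hm]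
    simp
  · have hmk : max_k + 1 = 1 + (max_k.toNat : Int) := by omega
    rw [hmk]
    have := pv_loop_eq vals max_k.toNat 1 le_rfl PySem.Dict.empty
    simp only [show ((1 : Int) - 1).toNat = 0 from rfl, List.take_zero, List.sum_nil] at this
    rw [this]
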